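-- pv_equiv track=rewrite | github.com/Shavvimal/model_cultural_comp | app/culture_map.py | Y003_transform
-- ===== SOURCE A (Python) =====
-- from typing import List
--
-- def Y003_transform(ans: List[int]):
--
--     # Inputs are like this [6, 7, 8, 9, 10]
--     # Return a list of true or fale from 0 through 10 based on if the number appears in the input
--     boolList = [i in ans for i in range(1, 12)]
--     # Map True to 1 and False to 2
--     scores = [1 if i else 2 for i in boolList]
--     qn_ans_dict = {
--         "q7": scores[0],
--         "q8": scores[1],
--         "q9": scores[2],
--         "q10": scores[3],
--         "q11": scores[4],
--         "q12": scores[5],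
--         "q13": scores[6],
--         "q14": scores[7],
--         "q15": scores[8],
--         "q16": scores[9],
--         "q17": scores[10],
--     }
--
--     # Compute Y003=-5.
--     # if Q15>=0 and Q17>=0 and Q8>=0 and Q14>=0 then
--     # Y003=(Q15 + Q17)-(Q8+Q14).
--
--     if qn_ans_dict["q15"] >= 0 and qn_ans_dict["q17"] >= 0 and qn_ans_dict["q8"] >= 0 and qn_ans_dict["q14"] >= 0:
--         y003 = qn_ans_dict["q15"] + qn_ans_dict["q17"] - (qn_ans_dict["q8"] + qn_ans_dict["q14"])
--     else:
--         y003 = -5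
--
--     return y003
-- ===== SOURCE B (Python) =====
-- from typing import List
--
-- def Y003_transform(ans: List[int]):
--     # Single pass: collect seen-flags for the four relevant numbers, then use
--     # the identity score(n) = 2 - [n in ans], so the result telescopes to
--     # [2 in] + [8 in] - [9 in] - [11 in].
--     seen2 = seen8 = seen9 = seen11 = False
--     for x in ans:
--         if x == 2:
--             seen2 = True
--         elif x == 8:
--             seen8 = True
--         elif x == 9:
--             seen9 = True
--         elif x == 11:
--             seen11 = True
--     return int(seen2) + int(seen8) - int(seen9) - int(seen11)
-- ===== Notes on version B (the rewrite author's own statement) =====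
-- stated objective: faster
-- what changed: Replaces A's build-everything structure (11 membership scans over ans, scores list, 11-key dict, guard) with one single pass over ans accumulating four seen-flags plus the telescoped arithmetic [2 in]+[8 in]-[9 in]-[11 in] via score(n)=2-[n in ans]; one traversal instead of eleven.
import Mathlib
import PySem

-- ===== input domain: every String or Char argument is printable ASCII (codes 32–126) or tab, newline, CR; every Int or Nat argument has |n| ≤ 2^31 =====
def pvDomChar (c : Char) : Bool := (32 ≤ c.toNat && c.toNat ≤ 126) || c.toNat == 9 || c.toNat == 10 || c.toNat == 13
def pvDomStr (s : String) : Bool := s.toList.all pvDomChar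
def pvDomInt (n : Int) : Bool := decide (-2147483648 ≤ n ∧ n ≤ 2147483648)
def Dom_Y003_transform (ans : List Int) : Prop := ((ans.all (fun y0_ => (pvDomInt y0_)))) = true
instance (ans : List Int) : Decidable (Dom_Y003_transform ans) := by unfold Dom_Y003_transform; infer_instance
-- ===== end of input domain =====

-- B replaces A's 11-membership-scan / scores-list / dict structure with one pass over
-- ans accumulating four seen-flags and the telescoped sum [2∈]+[8∈]-[9∈]-[11∈] (objective: alternative).

-- ===== PORT A =====
def Y003_transform (ans : List Int) : Int :=
  let boolList := (PySem.List.pyRange 1 12 1).map (fun i => ans.contains i)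
  let scores := boolList.map (fun b => if b then (1 : Int) else 2)
  let qnAnsDict : PySem.Dict String Int := PySem.Dict.mk
    [("q7", PySem.List.pyGetD scores 0 0), ("q8", PySem.List.pyGetD scores 1 0),
     ("q9", PySem.List.pyGetD scores 2 0), ("q10", PySem.List.pyGetD scores 3 0),
     ("q11", PySem.List.pyGetD scores 4 0), ("q12", PySem.List.pyGetD scores 5 0),
     ("q13", PySem.List.pyGetD scores 6 0), ("q14", PySem.List.pyGetD scores 7 0),
     ("q15", PySem.List.pyGetD scores 8 0), ("q16", PySem.List.pyGetD scores 9 0),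
     ("q17", PySem.List.pyGetD scores 10 0)]
  if qnAnsDict.getD "q15" 0 ≥ 0 ∧ qnAnsDict.getD "q17" 0 ≥ 0 ∧
     qnAnsDict.getD "q8" 0 ≥ 0 ∧ qnAnsDict.getD "q14" 0 ≥ 0 then
    qnAnsDict.getD "q15" 0 + qnAnsDict.getD "q17" 0 -
      (qnAnsDict.getD "q8" 0 + qnAnsDict.getD "q14" 0)
  else
    -5

-- ===== PORT B =====
-- one loop step of Source B's for-loop: update the four seen-flags
def pvStep (s : Bool × Bool × Bool × Bool) (x : Int) : Bool × Bool × Bool × Bool :=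
  if x = 2 then (true, s.2.1, s.2.2.1, s.2.2.2)
  else if x = 8 then (s.1, true, s.2.2.1, s.2.2.2)
  else if x = 9 then (s.1, s.2.1, true, s.2.2.2)
  else if x = 11 then (s.1, s.2.1, s.2.2.1, true)
  else s

def pvB2I (b : Bool) : Int := if b then 1 else 0

def Y003_transform_alt (ans : List Int) : Int :=
  let st := ans.foldl pvStep (false, false, false, false)
  pvB2I st.1 + pvB2I st.2.1 - pvB2I st.2.2.1 - pvB2I st.2.2.2

-- ===== PRECONDITION & SPEC =====
def Spec_Y003_transform (ans : List Int) (out : Int) : Prop := out = Y003_transform_alt ans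
instance (ans : List Int) (out : Int) : Decidable (Spec_Y003_transform ans out) := by unfold Spec_Y003_transform; infer_instance

-- ===== CLAIM (what is proved, stated in full; the proofs are below) =====
def Claim_equal_Y003_transform : Prop := ∀ (ans : List Int), Dom_Y003_transform ans → Spec_Y003_transform ans (Y003_transform ans)

-- ===== LEMMAS AND PROOFS =====

-- loop invariant: the fold computes the four membership flags (disjoined with the start state)
theorem pvFold_flags (ans : List Int) (a b c d : Bool) :
    ans.foldl pvStep (a, b, c, d) =
      (a || ans.contains 2, b || ans.contains 8, c || ans.contains 9, d || ans.contains 11) := by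
  induction ans generalizing a b c d with
  | nil => simp
  | cons x xs ih =>
    simp only [List.foldl_cons, List.contains_cons, pvStep]
    split_ifs with h2 h8 h9 h11 <;> rw [ih]
    · subst h2; simp
    · subst h8; simp
    · subst h9; simp
    · subst h11; simp
    · have e2 : ((2:Int) == x) = false := by rw [beq_eq_false_iff_ne]; exact fun h => h2 h.symm
      have e8 : ((8:Int) == x) = false := by rw [beq_eq_false_iff_ne]; exact fun h => h8 h.symm
      have e9 : ((9:Int) == x) = false := by rw [beq_eq_false_iff_ne]; exact fun h => h9 h.symm
      have e11 : ((11:Int) == x) = false := by rw [beq_eq_false_iff_ne]; exact fun h => h11 h.symm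
      simp [e2, e8, e9, e11]

-- ===== VERDICT (by name: the statement is the Claim_ definition above) =====
theorem Y003_transform_spec : Claim_equal_Y003_transform := by
  intro ans _
  unfold Spec_Y003_transform Y003_transform Y003_transform_alt
  have hr : PySem.List.pyRange 1 12 1 = [1,2,3,4,5,6,7,8,9,10,11] := by decide
  rw [hr, pvFold_flags]
  simp only [List.map_cons, List.map_nil, PySem.Dict.getD, PySem.Dict.get?_mk_cons,
    String.reduceBEq, if_true, if_false, Bool.false_eq_true]
  simp only [Option.getD_some]
  simp only [PySem.List.pyGetD_ofNat', List.getD_cons_succ, List.getD_cons_zero, Bool.false_or,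
    pvB2I]
  split_ifs <;> simp_all
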